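-- pv_equiv track=rewrite | github.com/duongve13112002/CS115.M11.KHCL | Exercise/Logistic Regesstion/Dataset - pima-indians-diabetes/main không dùng lib (Lấy 250 input đầu tính w và 250 input sau check độ chính xác.py | max_rows
-- ===== SOURCE A (Python) =====
-- def max_rows(X):
-- 	max_list_row = []
-- 	for i in range(0,len(X[0])):
-- 		max_row = X[0][i]
-- 		for j in range(0,len(X)):
-- 			if X[j][i] > max_row:
-- 				max_row = X[j][i]
-- 		max_list_row.append(max_row)
-- 	return max_list_row
-- ===== SOURCE B (Python) =====
-- def max_rows(X):
--     ncols = len(X[0])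
--
--     def vmax(a, b):
--         return [x if x >= y else y for x, y in zip(a, b)]
--
--     def solve(lo, hi):
--         if hi - lo == 1:
--             return [X[lo][i] for i in range(ncols)]
--         mid = (lo + hi) // 2
--         return vmax(solve(lo, mid), solve(mid, hi))
--
--     return solve(0, len(X))
-- ===== Notes on version B (the rewrite author's own statement) =====
-- stated objective: alternative
-- what changed: Replaces A's column-outer/row-inner scalar running-max loops by a divide-and-conquer over the row range: recursively split the rows in half and combine the two halves' results with an elementwise vector max.
import Mathlib
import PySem

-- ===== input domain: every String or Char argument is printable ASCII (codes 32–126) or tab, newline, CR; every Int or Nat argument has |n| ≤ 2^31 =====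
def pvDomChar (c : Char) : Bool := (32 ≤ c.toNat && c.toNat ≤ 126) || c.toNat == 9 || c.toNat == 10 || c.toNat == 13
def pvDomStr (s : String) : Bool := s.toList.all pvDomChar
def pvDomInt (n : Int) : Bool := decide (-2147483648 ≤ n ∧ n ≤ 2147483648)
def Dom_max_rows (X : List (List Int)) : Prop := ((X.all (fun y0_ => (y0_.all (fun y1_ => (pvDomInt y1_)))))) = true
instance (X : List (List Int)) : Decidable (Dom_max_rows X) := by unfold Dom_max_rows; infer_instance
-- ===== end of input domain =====

-- ===== PORT A =====
-- B replaces A's column-outer/row-inner running-max loops by a divide-and-conquer over the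
-- row range combined with an elementwise vector max; return values proved equal on Pre_.
def max_rows (X : List (List Int)) : List Int :=
  (PySem.List.pyRange 0 ((PySem.List.pyGetD X 0 []).length : Int) 1).foldl
    (fun max_list_row i =>
      let start := PySem.List.pyGetD (PySem.List.pyGetD X 0 []) i 0
      let max_row := (PySem.List.pyRange 0 ((X.length : Int)) 1).foldl
        (fun max_row j =>
          if PySem.List.pyGetD (PySem.List.pyGetD X j []) i 0 > max_row then
            PySem.List.pyGetD (PySem.List.pyGetD X j []) i 0
          else max_row) start
      max_list_row ++ [max_row]) []

-- ===== PORT B =====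
-- vmax(a, b): elementwise max, keeping the left element on ties (x if x >= y else y)
def pvVmax (a b : List Int) : List Int :=
  (a.zip b).map (fun p => if p.1 ≥ p.2 then p.1 else p.2)

-- solve(lo, hi); Python's base test 'hi - lo == 1' is written 'hi ≤ lo + 1' — equivalent on
-- every reachable call (which has lo < hi) — so that the recursion is total.
def pvSolve (X : List (List Int)) (ncols lo hi : Nat) : List Int :=
  if hi ≤ lo + 1 then
    (List.range ncols).map (fun i =>
      PySem.List.pyGetD (PySem.List.pyGetD X (Int.ofNat lo) []) (Int.ofNat i) 0)
  else
    pvVmax (pvSolve X ncols lo ((lo + hi) / 2)) (pvSolve X ncols ((lo + hi) / 2) hi)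
termination_by hi - lo
decreasing_by all_goals omega

def max_rows_alt (X : List (List Int)) : List Int :=
  pvSolve X (PySem.List.pyGetD X 0 []).length 0 X.length

-- ===== PRECONDITION & SPEC =====
-- Pre_ excludes exactly the inputs where A raises IndexError: the empty matrix (X[0])
-- and ragged matrices with some row shorter than the first row (X[j][i]).
def Pre_max_rows (X : List (List Int)) : Prop :=
  X ≠ [] ∧ ∀ r ∈ X, (X.headD []).length ≤ r.length
instance (X : List (List Int)) : Decidable (Pre_max_rows X) := by unfold Pre_max_rows; infer_instance
def pvWitness_max_rows : List (List Int) := [[1, 2], [3, 0]]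

def Spec_max_rows (X : List (List Int)) (out : List Int) : Prop := out = max_rows_alt X
instance (X : List (List Int)) (out : List Int) : Decidable (Spec_max_rows X out) := by unfold Spec_max_rows; infer_instance

-- ===== CLAIM (what is proved, stated in full; the proofs are below) =====
def Claim_equal_max_rows : Prop := ∀ (X : List (List Int)), Dom_max_rows X → Pre_max_rows X → Spec_max_rows X (max_rows X)

-- ===== LEMMAS AND PROOFS =====

-- entry i of a row, with A's/B's pyGetD default
def pvEnt (r : List Int) (i : Nat) : Int := PySem.List.pyGetD r (i : Int) 0

-- column-i maximum of a nonempty block of rows (0 for the empty block)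
def pvColMax (rows : List (List Int)) (i : Nat) : Int :=
  match rows with
  | [] => 0
  | r :: rest => rest.foldl (fun m row => max m (pvEnt row i)) (pvEnt r i)

theorem ite_ge_eq_max (x y : Int) : (if x ≥ y then x else y) = max x y := by
  simp only [max_def]; split_ifs <;> omega

theorem ite_gt_eq_max (m v : Int) : (if v > m then v else m) = max m v := by
  simp only [max_def]; split_ifs <;> omega

theorem foldl_max_shift {α : Type} (g : α → Int) (l : List α) :
    ∀ a b : Int, l.foldl (fun m x => max m (g x)) (max a b)
      = max a (l.foldl (fun m x => max m (g x)) b) := by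
  induction l with
  | nil => intro a b; rfl
  | cons c l ih =>
    intro a b
    simp only [List.foldl_cons, max_assoc]
    exact ih a (max b (g c))

theorem pvColMax_append (s1 s2 : List (List Int)) (i : Nat)
    (h1 : s1 ≠ []) (h2 : s2 ≠ []) :
    pvColMax (s1 ++ s2) i = max (pvColMax s1 i) (pvColMax s2 i) := by
  obtain ⟨r, rest, rfl⟩ : ∃ r rest, s1 = r :: rest := by
    cases s1 with
    | nil => exact absurd rfl h1
    | cons a l => exact ⟨a, l, rfl⟩
  obtain ⟨r2, rest2, rfl⟩ : ∃ r2 rest2, s2 = r2 :: rest2 := by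
    cases s2 with
    | nil => exact absurd rfl h2
    | cons a l => exact ⟨a, l, rfl⟩
  simp only [pvColMax, List.cons_append, List.foldl_append, List.foldl_cons]
  exact foldl_max_shift _ rest2 _ _

theorem pvVmax_map_range (n : Nat) (f h : Nat → Int) :
    pvVmax ((List.range n).map f) ((List.range n).map h)
      = (List.range n).map (fun i => max (f i) (h i)) := by
  unfold pvVmax
  rw [List.zip_map']
  simp only [List.map_map]
  exact List.map_congr_left (fun k _ => ite_ge_eq_max (f k) (h k))

-- divide-and-conquer characterisation: solve(lo, hi) is the columnwise max of rows lo..hi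
theorem pvSolve_eq (X : List (List Int)) (ncols : Nat) :
    ∀ lo hi : Nat, lo < hi → hi ≤ X.length →
      pvSolve X ncols lo hi
        = (List.range ncols).map (fun i => pvColMax ((X.drop lo).take (hi - lo)) i) := by
  suffices h : ∀ n lo hi, hi - lo = n → lo < hi → hi ≤ X.length →
      pvSolve X ncols lo hi
        = (List.range ncols).map (fun i => pvColMax ((X.drop lo).take (hi - lo)) i) by
    intro lo hi h1 h2; exact h (hi - lo) lo hi rfl h1 h2
  intro n
  induction n using Nat.strong_induction_on with
  | _ n ih =>
  intro lo hi hn hlt hle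
  subst hn
  rw [pvSolve]
  by_cases hb : hi ≤ lo + 1
  · have hhi : hi = lo + 1 := by omega
    subst hhi
    simp only [if_pos hb]
    have hlo : lo < X.length := by omega
    have hdrop : X.drop lo = X[lo] :: X.drop (lo + 1) := List.drop_eq_getElem_cons hlo
    refine List.map_congr_left (fun i _ => ?_)
    rw [hdrop]
    simp only [Nat.add_sub_cancel_left, List.take_succ_cons, List.take_zero, pvColMax,
      List.foldl_nil, pvEnt, Int.ofNat_eq_natCast, PySem.List.pyGetD_natCast]
    rw [List.getD_eq_getElem _ _ hlo]
  · simp only [if_neg hb]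
    have hm1 : lo < (lo + hi) / 2 := by omega
    have hm2 : (lo + hi) / 2 < hi := by omega
    rw [ih _ (by omega) lo ((lo + hi) / 2) rfl hm1 (by omega),
        ih _ (by omega) ((lo + hi) / 2) hi rfl hm2 hle,
        pvVmax_map_range]
    refine List.map_congr_left (fun i _ => ?_)
    have hseg : (X.drop lo).take (hi - lo)
        = (X.drop lo).take ((lo + hi) / 2 - lo)
          ++ (X.drop ((lo + hi) / 2)).take (hi - (lo + hi) / 2) := by
      have : hi - lo = ((lo + hi) / 2 - lo) + (hi - (lo + hi) / 2) := by omega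
      rw [this, List.take_add, List.drop_drop]
      have : lo + ((lo + hi) / 2 - lo) = (lo + hi) / 2 := by omega
      rw [this]
    rw [hseg, pvColMax_append]
    · simp only [ne_eq, ← List.length_pos_iff, List.length_take, List.length_drop]
      omega
    · simp only [ne_eq, ← List.length_pos_iff, List.length_take, List.length_drop]
      omega

-- A's inner loop over row indices is a fold of max over the rows
theorem inner_eq (r0 : List Int) (rs : List (List Int)) (i : Int) :
    ((PySem.List.pyRange 0 (((r0 :: rs).length : Int)) 1).foldl
      (fun max_row j =>
        if PySem.List.pyGetD (PySem.List.pyGetD (r0 :: rs) j []) i 0 > max_row then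
          PySem.List.pyGetD (PySem.List.pyGetD (r0 :: rs) j []) i 0
        else max_row) (PySem.List.pyGetD r0 i 0))
    = rs.foldl (fun m row => max m (PySem.List.pyGetD row i 0)) (PySem.List.pyGetD r0 i 0) := by
  rw [PySem.List.foldl_pyRange_zero_pyGetD' (r0 :: rs) []
    (fun max_row row => if PySem.List.pyGetD row i 0 > max_row then PySem.List.pyGetD row i 0 else max_row)
    (PySem.List.pyGetD r0 i 0)]
  simp only [List.foldl_cons, ite_gt_eq_max, max_self]

-- A's result is the columnwise max, column by column
theorem max_rows_char (r0 : List Int) (rs : List (List Int)) :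
    max_rows (r0 :: rs)
      = (List.range r0.length).map (fun i => pvColMax (r0 :: rs) i) := by
  unfold max_rows
  simp only [PySem.List.pyGetD_zero_cons]
  rw [PySem.List.foldl_append_singleton_eq_map, List.nil_append]
  rw [PySem.List.pyRange_one 0 ((r0.length : Int))]
  simp only [sub_zero, Int.toNat_natCast, List.map_map]
  refine List.map_congr_left (fun k _ => ?_)
  simp only [Function.comp, zero_add]
  rw [inner_eq]
  simp only [pvColMax, pvEnt]

theorem max_rows_spec : Claim_equal_max_rows := by
  unfold Claim_equal_max_rows
  intro X _ hpre
  unfold Spec_max_rows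
  obtain ⟨hne, -⟩ := hpre
  obtain ⟨r0, rs, rfl⟩ : ∃ r0 rs, X = r0 :: rs := by
    cases X with
    | nil => exact absurd rfl hne
    | cons a l => exact ⟨a, l, rfl⟩
  unfold max_rows_alt
  simp only [PySem.List.pyGetD_zero_cons]
  rw [pvSolve_eq (r0 :: rs) r0.length 0 (r0 :: rs).length (by simp) le_rfl]
  simp only [List.drop_zero, Nat.sub_zero, List.take_length]
  exact max_rows_char r0 rs
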